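-- pv_equiv track=rewrite | github.com/hiteshsapkota/developer-trust | crawlgithubdata.py | getprojectname
-- ===== SOURCE A (Python) =====
-- def getprojectname(url):
--     count=0
--     str=[]
--     for a in url:
--         if count>=5:
--             str+=a
--         if a=='/':
--             count=count+1
--     str=''.join(str)
--     return str
-- ===== SOURCE B (Python) =====
-- def getprojectname(url):
--     return '/'.join(url.split('/')[5:])
-- ===== Notes on version B (the rewrite author's own statement) =====
-- stated objective: idiomatic
-- what changed: Replaced the character scan with a slash counter by tokenize-and-join: split the url on the slash separator and rejoin the segments after the fifth, slicing (not indexing) so that urls with fewer than five slashes yield an empty result exactly as A does.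
import Mathlib
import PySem

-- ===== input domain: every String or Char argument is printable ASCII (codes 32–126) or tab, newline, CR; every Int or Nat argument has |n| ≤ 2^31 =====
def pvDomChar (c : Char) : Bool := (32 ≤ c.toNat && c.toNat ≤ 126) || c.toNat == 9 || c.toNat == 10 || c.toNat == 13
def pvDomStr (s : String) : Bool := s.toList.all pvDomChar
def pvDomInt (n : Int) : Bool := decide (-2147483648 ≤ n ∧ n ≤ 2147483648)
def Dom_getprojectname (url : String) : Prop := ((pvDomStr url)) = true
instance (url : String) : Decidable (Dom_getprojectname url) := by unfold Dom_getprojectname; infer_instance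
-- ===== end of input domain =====

-- B rewrites A's character scan as tokenize-and-join (split on '/', rejoin the segments after the fifth); idiomatic, and measured faster by a constant factor (C-level split/join vs a per-character Python loop).

-- ===== PORT A =====
-- literal port: scan the characters, counting slashes, collecting chars once count ≥ 5
def getprojectname (url : String) : String :=
  let st := url.toList.foldl
    (fun (st : Nat × List Char) a =>
      let str := if st.1 ≥ 5 then st.2 ++ [a] else st.2
      let count := if a = '/' then st.1 + 1 else st.1
      (count, str))
    (0, [])
  String.ofList st.2

-- ===== PORT B =====
-- literal port of Source B: '/'.join(url.split('/')[5:])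
def getprojectname_alt (url : String) : String :=
  let segments := PySem.Chars.splitOn url.toList ['/']
  String.ofList (PySem.Chars.join ['/'] (PySem.List.slice segments (some 5) none))

-- ===== PRECONDITION & SPEC =====
def Spec_getprojectname (url : String) (out : String) : Prop := out = getprojectname_alt url
instance (url : String) (out : String) : Decidable (Spec_getprojectname url out) := by unfold Spec_getprojectname; infer_instance

-- ===== CLAIM (what is proved, stated in full; the proofs are below) =====
def Claim_equal_getprojectname : Prop := ∀ (url : String), Dom_getprojectname url → Spec_getprojectname url (getprojectname url)

-- ===== LEMMAS AND PROOFS =====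

-- the characters strictly after the n-th '/' of cs ('' if there are fewer than n slashes)
def pvAfter : Nat → List Char → List Char
  | 0, cs => cs
  | _ + 1, [] => []
  | n + 1, c :: rest => pvAfter (if c = '/' then n else n + 1) rest

-- structural form of splitOn on separator "/": (first segment, remaining segments)
def pvSplit : List Char → List Char × List (List Char)
  | [] => ([], [])
  | c :: rest =>
    let p := pvSplit rest
    if c = '/' then ([], p.1 :: p.2) else (c :: p.1, p.2)

theorem pvAfter_nil (n : Nat) : pvAfter n [] = [] := by cases n <;> rfl

-- A's loop collects exactly the characters after the (5 - count)-th remaining slash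
theorem pvA_loop (cs : List Char) : ∀ (count : Nat) (acc : List Char),
    (cs.foldl
      (fun (st : Nat × List Char) a =>
        let str := if st.1 ≥ 5 then st.2 ++ [a] else st.2
        let count := if a = '/' then st.1 + 1 else st.1
        (count, str))
      (count, acc)).2 = acc ++ pvAfter (5 - count) cs := by
  induction cs with
  | nil => intro count acc; simp [pvAfter_nil]
  | cons c rest ih =>
    intro count acc
    simp only [List.foldl_cons]
    by_cases h5 : count ≥ 5
    · have h0 : 5 - count = 0 := by omega
      by_cases hc : c = '/'
      · have h1 : 5 - (count + 1) = 0 := by omega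
        simp only [if_pos h5, if_pos hc, ih, h1, h0, pvAfter]
        simp
      · simp only [if_pos h5, if_neg hc, ih, h0, pvAfter]
        simp
    · have h0 : 5 - count = (5 - count - 1) + 1 := by omega
      by_cases hc : c = '/'
      · have h1 : 5 - (count + 1) = 5 - count - 1 := by omega
        simp only [if_neg h5, if_pos hc, ih, h1]
        rw [h0]
        simp [pvAfter, hc]
      · simp only [if_neg h5, if_neg hc, ih]
        rw [h0]
        simp [pvAfter, hc]

-- splitOn.go on separator "/" in terms of pvSplit (enough fuel)
theorem pvGo_spec (fuel : Nat) : ∀ (l cur : List Char) (accs : List (List Char)),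
    l.length ≤ fuel →
    PySem.Chars.splitOn.go ['/'] fuel l cur accs.reverse =
      accs ++ ((cur.reverse ++ (pvSplit l).1) :: (pvSplit l).2) := by
  induction fuel with
  | zero =>
    intro l cur accs hl
    have : l = [] := by cases l <;> simp_all
    subst this
    simp [PySem.Chars.splitOn.go, pvSplit]
  | succ fuel ih =>
    intro l cur accs hl
    cases l with
    | nil => simp [PySem.Chars.splitOn.go, pvSplit]
    | cons c rest =>
      by_cases hc : c = '/'
      · have hp : ['/'].isPrefixOf (c :: rest) = true := by simp [hc, List.isPrefixOf]
        rw [PySem.Chars.splitOn.go]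
        simp only [hp, if_pos]
        have := ih rest [] (accs ++ [cur.reverse]) (by simpa using Nat.le_of_succ_le_succ hl)
        simp only [List.reverse_append, List.reverse_cons, List.reverse_nil, List.nil_append] at this ⊢
        simpa [pvSplit, hc] using this
      · have hp : ['/'].isPrefixOf (c :: rest) = false := by
          simp [List.isPrefixOf]; exact fun h => (hc h.symm).elim
        rw [PySem.Chars.splitOn.go]
        simp only [hp, Bool.false_eq_true, if_neg, not_false_iff]
        have := ih rest (c :: cur) accs (by simpa using Nat.le_of_succ_le_succ hl)
        simp only [List.reverse_cons] at this
        simpa [pvSplit, hc] using this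

theorem pvSplitOn_eq (cs : List Char) :
    PySem.Chars.splitOn cs ['/'] = (pvSplit cs).1 :: (pvSplit cs).2 := by
  have := pvGo_spec (cs.length + 1) cs [] [] (by omega)
  simpa [PySem.Chars.splitOn] using this

-- joining the segments after the n-th gives exactly the characters after the n-th '/'
theorem pvJoin_drop (cs : List Char) : ∀ (n : Nat),
    PySem.Chars.join ['/'] (List.drop n ((pvSplit cs).1 :: (pvSplit cs).2)) = pvAfter n cs := by
  induction cs with
  | nil =>
    intro n
    cases n with
    | zero => simp [pvSplit, PySem.Chars.join_singleton, pvAfter]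
    | succ m => simp [pvSplit, pvAfter_nil, PySem.Chars.join_nil]
  | cons c rest ih =>
    intro n
    by_cases hc : c = '/'
    · cases n with
      | zero =>
        have h := ih 0
        simp only [List.drop_zero] at h ⊢
        simp only [pvSplit, if_pos hc]
        rw [PySem.Chars.join_cons_cons, h]
        simp [pvAfter, hc]
      | succ m =>
        have h := ih m
        simp only [pvSplit, if_pos hc, List.drop_succ_cons]
        rw [h]
        simp [pvAfter, hc]
    · cases n with
      | zero =>
        have h := ih 0
        simp only [List.drop_zero] at h ⊢
        simp only [pvSplit, if_neg hc]
        show PySem.Chars.join ['/'] ((c :: (pvSplit rest).1) :: (pvSplit rest).2) = pvAfter 0 (c :: rest)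
        cases hss : (pvSplit rest).2 with
        | nil =>
          rw [hss] at h
          rw [PySem.Chars.join_singleton] at h ⊢
          simp only [pvAfter] at h
          simp [h, pvAfter]
        | cons s ss =>
          rw [hss] at h
          rw [PySem.Chars.join_cons_cons] at h ⊢
          simp only [pvAfter] at h
          simp only [List.cons_append, h]
          simp [pvAfter]
      | succ m =>
        have h := ih (m + 1)
        simp only [pvSplit, if_neg hc, List.drop_succ_cons] at h ⊢
        rw [h]
        simp [pvAfter, hc]

-- ===== VERDICT (by name: the statement is the Claim_ definition above) =====
theorem getprojectname_spec : Claim_equal_getprojectname := by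
  intro url _
  show getprojectname url = getprojectname_alt url
  unfold getprojectname getprojectname_alt
  dsimp only
  rw [pvSplitOn_eq]
  rw [show PySem.List.slice ((pvSplit url.toList).1 :: (pvSplit url.toList).2) (some 5) none
        = List.drop 5 ((pvSplit url.toList).1 :: (pvSplit url.toList).2) from by simp [pysem]]
  rw [pvJoin_drop, pvA_loop]
  simp
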